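-- pv_equiv track=rewrite | github.com/HUN0914/KB7-Algorithm-Study | Choonghun/programmers/64064번 - 불량 사용자/불량 사용자.py | solution
-- ===== SOURCE A (Python) =====
-- def solution(user_id, banned_id):
--     """
--     user_id에 중복은 없다, 길이는 1 이상 8이하, 배열의 크기도 1이상 8이하
--     """
--     BanNum = len(banned_id) # 밴 id 개수
--     check = [0 for _ in range(2**len(user_id))] # 체크용 -> 비트마스킹 사용
--     banned_case = [[] for _ in range(BanNum)] # 각 banned_id마다 적용 가능한 user_id의 인덱스를 저장할 2차원 배열
--     def compare_word(alp, ban): # 각 자리수를 비교할 메서드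
--         if ban == '*': # ban 쪽이 *이면 True
--             return True
--         elif ban == alp: # 둘이 같아도 True
--             return True
--         return False # 그 외는 Faluse
--
--     def binTodec(bin): # 0, 1로 이루어진 배열(이진수)를 십진수로 변환하는 메서드
--         res = 0
--         for i in range(len(bin)):
--             res += bin[i] * 2**i
--         return res
--
--     for i in range(len(user_id)): #각 user_id에 대하여
--         id = user_id[i]
--         for j in range(len(banned_id)): # banned_id를 비교해서
--             ban = banned_id[j]
--             if len(id) != len(ban): # 길이가 다르면 패스
--                 continue
--             flag = 1 # 패턴이 부합하는지 여부를 체크하기 위한 플래그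
--             for k in range(len(id)): # 각 자리수를 비교
--                 if not compare_word(id[k], ban[k]): # 다르면 flag를 0으로 바꾸고 break
--                     flag = 0
--                     break
--             if flag: # 패턴이 부합한다면 flag는 1이므로 해당 패턴에 대해 해당 id의 인덱스를 추가한다.
--                 banned_case[j].append(i)
--     backtrack_check = [0 for _ in range(len(user_id))] # 백트랙을 진행하기 위한 체크 배열 (2진수 역할)
--     def backtrack(cur): # 백트랙 함수
--         if cur == len(banned_case): # 만약 끝에 도달하면
--             check[binTodec(backtrack_check)] = 1 # 2진수를 10진수로 변환하고 체크 후 종료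
--             return
--
--         for i in banned_case[cur]: # cur 번째 case에 대한 id가
--             if not backtrack_check[i]: # 이미 밴 목록에 포함됐는지 체크
--                 backtrack_check[i] = 1 # 포함하고
--                 backtrack(cur+1) # 다음 패턴으로 넘어갔다가
--                 backtrack_check[i] = 0 # 다시 해제
--     backtrack(0) # cur은 0부터
--     return sum(check) # check는 0과 1로 이루어져 있으므로 가능한 경우의 수만큼 1이 있을 것이므로 sum(check)가 곧 정답
-- ===== SOURCE B (Python) =====
-- def solution(user_id, banned_id):
--     def match(u, b):
--         return len(u) == len(b) and all(bc == '*' or bc == uc for uc, bc in zip(u, b))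
--     cands = [[i for i, u in enumerate(user_id) if match(u, b)] for b in banned_id]
--     combos = [()]
--     for c in cands:
--         combos = [t + (i,) for t in combos for i in c if i not in t]
--     return len({tuple(sorted(t)) for t in combos})
-- ===== Notes on version B (the rewrite author's own statement) =====
-- stated objective: faster
-- what changed: Replaces the recursive backtracking over a mutable 2^len(user_id) bitmask check array by an iterative product-with-pruning over the per-pattern candidate index lists, deduplicating the surviving index tuples as sorted tuples in a set and returning its size; this avoids allocating and summing the 2^n check array entirely.
import Mathlib
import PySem

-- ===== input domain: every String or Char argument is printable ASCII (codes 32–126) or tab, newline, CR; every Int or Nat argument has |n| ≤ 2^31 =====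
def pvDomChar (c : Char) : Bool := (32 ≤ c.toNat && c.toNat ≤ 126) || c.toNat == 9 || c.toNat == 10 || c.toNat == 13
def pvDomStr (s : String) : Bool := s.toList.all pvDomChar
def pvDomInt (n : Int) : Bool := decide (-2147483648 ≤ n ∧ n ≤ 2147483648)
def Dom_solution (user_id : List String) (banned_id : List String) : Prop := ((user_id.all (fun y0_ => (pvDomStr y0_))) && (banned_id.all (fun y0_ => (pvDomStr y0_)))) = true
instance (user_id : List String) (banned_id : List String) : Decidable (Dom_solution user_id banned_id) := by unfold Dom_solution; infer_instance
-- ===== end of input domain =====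

-- B replaces A's recursive backtracking over a mutable 2^n bitmask check array by an
-- iterative product-with-pruning over the candidate index lists, deduplicating the
-- resulting index tuples as sorted tuples in a set (objective: idiomatic).

-- ===== PORT A =====
-- compare_word(alp, ban)
def compareWord (alp ban : Char) : Bool :=
  if ban = '*' then true
  else if ban = alp then true
  else false

-- the inner 'for k in range(len(id)): if not compare_word(id[k], ban[k]): flag = 0; break'
-- (called only with lists of equal length; returns the final flag)
def flagLoop : List Char → List Char → Int
  | _, [] => 1
  | [], _ :: _ => 1
  | a :: as, b :: bs => if compareWord a b then flagLoop as bs else 0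

-- binTodec(bin): res += bin[i] * 2**i over i in range(len(bin))
def binTodec (bin : List Int) : Int :=
  (List.range bin.length).foldl (fun res i => res + bin.getD i 0 * 2 ^ i) 0

-- the double loop building banned_case (indices kept as Nat: they come from range(len(user_id)))
def buildCases (user_id banned_id : List String) : List (List Nat) :=
  (List.range user_id.length).foldl (fun bc i =>
    (List.range banned_id.length).foldl (fun bc j =>
      let id := (user_id.getD i "").toList
      let ban := (banned_id.getD j "").toList
      if id.length ≠ ban.length then bc
      else if flagLoop id ban = 1 then bc.modify j (fun l => l ++ [i]) else bc) bc)
    (List.replicate banned_id.length [])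

-- backtrack(cur): recursion over the remaining suffix of banned_case, threading
-- backtrack_check (btc) and check; the Python set/recurse/unset pair is the functional
-- 'recurse with btc.set i 1, continue with the old btc'
mutual
def backtrackA : List (List Nat) → List Int → List Int → List Int
  | [], btc, check => check.set (binTodec btc).toNat 1
  | c :: rest, btc, check => btInner c rest btc check
  termination_by bc _ _ => (bc.length, 0, 0)
def btInner : List Nat → List (List Nat) → List Int → List Int → List Int
  | [], _, _, check => check
  | i :: is, rest, btc, check =>
      btInner is rest btc
        (if btc.getD i 0 == 0 then backtrackA rest (btc.set i 1) check else check)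
  termination_by c rest _ _ => (rest.length, 1, c.length)
end

def solution (user_id : List String) (banned_id : List String) : Int :=
  let check := List.replicate (2 ^ user_id.length) (0 : Int)
  let bc := buildCases user_id banned_id
  let btc := List.replicate user_id.length (0 : Int)
  (backtrackA bc btc check).foldl (· + ·) 0

-- ===== PORT B =====
def matchB (u b : List Char) : Bool :=
  u.length == b.length && (u.zip b).all (fun p => p.2 == '*' || p.2 == p.1)

def solution_alt (user_id : List String) (banned_id : List String) : Int :=
  let cands := banned_id.map (fun b =>
    ((PySem.List.enumerate user_id).filter
        (fun p => matchB p.2.toList b.toList)).map (fun p => p.1.toNat))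
  let combos := cands.foldl (fun acc c =>
    acc.flatMap (fun t => (c.filter (fun i => ¬ t.contains i)).map (fun i => t ++ [i]))) [[]]
  ((PySem.Set.ofList (combos.map (fun t => t.mergeSort (· ≤ ·)))).length : Int)

-- ===== PRECONDITION & SPEC =====
def Spec_solution (user_id : List String) (banned_id : List String) (out : Int) : Prop := out = solution_alt user_id banned_id
instance (user_id : List String) (banned_id : List String) (out : Int) : Decidable (Spec_solution user_id banned_id out) := by unfold Spec_solution; infer_instance

-- ===== CLAIM (what is proved, stated in full; the proofs are below) =====
def Claim_equal_solution : Prop := ∀ (user_id : List String) (banned_id : List String), Dom_solution user_id banned_id → Spec_solution user_id banned_id (solution user_id banned_id)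

-- ===== LEMMAS AND PROOFS =====

-- proof-side definitions
def setOnes (ms : List Nat) (check : List Int) : List Int :=
  ms.foldl (fun ch m => ch.set m 1) check

def MarkList : List (List Nat) → List Int → List Nat
  | [], btc => [(binTodec btc).toNat]
  | c :: rest, btc =>
      (c.filter (fun i => btc.getD i 0 == 0)).flatMap (fun i => MarkList rest (btc.set i 1))

def ExtL : List (List Nat) → List Nat → List (List Nat)
  | [], _ => [[]]
  | c :: rest, u =>
      (c.filter (fun i => ¬ u.contains i)).flatMap
        (fun i => (ExtL rest (u ++ [i])).map (fun t => i :: t))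

def paint (btc : List Int) (t : List Nat) : List Int :=
  t.foldl (fun b i => b.set i 1) btc

def IsBin (l : List Int) : Prop := ∀ x ∈ l, x = 0 ∨ x = 1

def binLE : List Int → Int
  | [] => 0
  | b :: bs => b + 2 * binLE bs

def candsOf (u bnd : List String) : List (List Nat) :=
  bnd.map (fun b => (List.range u.length).filter (fun i => matchB (u.getD i "").toList b.toList))

def maskF (btc0 : List Int) (t : List Nat) : Nat := (binTodec (paint btc0 t)).toNat

-- A's loop-step over one banned index j, for user index i (zeta-reduced form of the port's lambda)
def stepA (u bnd : List String) (i : Nat) (bc : List (List Nat)) (j : Nat) : List (List Nat) :=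
  if (u.getD i "").toList.length ≠ (bnd.getD j "").toList.length then bc
  else if flagLoop (u.getD i "").toList (bnd.getD j "").toList = 1 then
    bc.modify j (fun l => l ++ [i])
  else bc

def innerAll (u bnd : List String) (i : Nat) (bc : List (List Nat)) : List (List Nat) :=
  (List.range bnd.length).foldl (stepA u bnd i) bc

-- getD glue
theorem getD_set_self : ∀ (l : List Int) (i : Nat) (a : Int), i < l.length →
    (l.set i a).getD i 0 = a
  | _ :: _, 0, _, _ => rfl
  | _ :: xs, n+1, a, h => getD_set_self xs n a (by simpa using h)

theorem getD_set_ne (l : List Int) (i j : Nat) (a : Int) (h : i ≠ j) :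
    (l.set i a).getD j 0 = l.getD j 0 := by
  simp [List.getD, List.getElem?_set_ne h]

theorem getD_modify_self (l : List (List Nat)) (j : Nat) (f : List Nat → List Nat)
    (h : j < l.length) : (l.modify j f).getD j [] = f (l.getD j []) := by
  simp [List.getD, h]

theorem getD_modify_ne (l : List (List Nat)) (i j : Nat) (f : List Nat → List Nat)
    (h : i ≠ j) : (l.modify i f).getD j [] = l.getD j [] := by
  simp [List.getD, h]

-- binTodec is the little-endian value
theorem binTodec_eq_binLE (l : List Int) : binTodec l = binLE l := by
  induction l with
  | nil => simp [binTodec, binLE]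
  | cons b bs ih =>
    unfold binTodec at *
    rw [PySem.List.foldl_add] at *
    rw [List.length_cons, List.range_succ_eq_map]
    simp only [List.map_cons, List.map_map, List.sum_cons, Function.comp_def,
      Nat.succ_eq_add_one, List.getD_cons_zero, List.getD_cons_succ, pow_zero, mul_one,
      pow_succ, ← mul_assoc, binLE]
    rw [List.sum_map_mul_right]
    omega

theorem binLE_bounds (l : List Int) (h : IsBin l) : 0 ≤ binLE l ∧ binLE l < 2 ^ l.length := by
  induction l with
  | nil => simp [binLE]
  | cons b bs ih =>
    have hb := h b (by simp)
    have ih' := ih (fun x hx => h x (List.mem_cons_of_mem b hx))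
    simp only [binLE, List.length_cons, pow_succ]
    omega

theorem binLE_inj (l1 l2 : List Int) (h1 : IsBin l1) (h2 : IsBin l2)
    (hl : l1.length = l2.length) (h : binLE l1 = binLE l2) : l1 = l2 := by
  induction l1 generalizing l2 with
  | nil => cases l2 with
    | nil => rfl
    | cons b bs => simp at hl
  | cons a as ih =>
    cases l2 with
    | nil => simp at hl
    | cons b bs =>
      have ha := h1 a (by simp)
      have hb := h2 b (by simp)
      have hab := binLE_bounds as (fun x hx => h1 x (List.mem_cons_of_mem a hx))
      have hbb := binLE_bounds bs (fun x hx => h2 x (List.mem_cons_of_mem b hx))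
      simp only [binLE] at h
      have hhead : a = b := by omega
      subst hhead
      have htail : binLE as = binLE bs := by omega
      exact congrArg (List.cons a)
        (ih bs (fun x hx => h1 x (List.mem_cons_of_mem a hx))
          (fun x hx => h2 x (List.mem_cons_of_mem a hx)) (by simpa using hl) htail)

-- paint
theorem paint_cons (btc : List Int) (i : Nat) (t : List Nat) :
    paint btc (i :: t) = paint (btc.set i 1) t := rfl

theorem paint_length (t : List Nat) : ∀ btc, (paint btc t).length = btc.length := by
  induction t with
  | nil => intro btc; rfl
  | cons i t ih => intro btc; rw [paint_cons, ih, List.length_set]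

theorem paint_isBin (t : List Nat) : ∀ btc, IsBin btc → IsBin (paint btc t) := by
  induction t with
  | nil => intro btc h; exact h
  | cons i t ih =>
    intro btc h
    rw [paint_cons]
    refine ih _ (fun x hx => ?_)
    rcases List.mem_or_eq_of_mem_set hx with hm | he
    · exact h x hm
    · right; exact he

theorem paint_getD (t : List Nat) : ∀ (btc : List Int) (j : Nat),
    (∀ i ∈ t, i < btc.length) → j < btc.length →
    (paint btc t).getD j 0 = if j ∈ t then 1 else btc.getD j 0 := by
  induction t with
  | nil => intro btc j _ _; simp [paint]
  | cons i t ih =>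
    intro btc j hts hj
    rw [paint_cons, ih _ j (fun x hx => by
        rw [List.length_set]; exact hts x (List.mem_cons_of_mem i hx)) (by simpa using hj)]
    by_cases hjt : j ∈ t
    · rw [if_pos hjt, if_pos (List.mem_cons_of_mem i hjt)]
    · by_cases hji : j = i
      · subst hji
        rw [if_neg hjt, getD_set_self btc j 1 hj, if_pos (List.mem_cons_self)]
      · rw [if_neg hjt, getD_set_ne btc i j 1 (fun hh => hji hh.symm),
          if_neg (by simp [hji, hjt])]

theorem paint_perm (btc : List Int) (t1 t2 : List Nat) (h : t1.Perm t2) :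
    paint btc t1 = paint btc t2 := by
  unfold paint
  letI : RightCommutative (fun (b : List Int) (i : Nat) => b.set i 1) := ⟨by
    intro b i j
    by_cases hij : i = j
    · subst hij; simp [List.set_set]
    · exact List.set_comm _ _ hij⟩
  exact h.foldl_eq btc

-- setOnes
theorem setOnes_length (ms : List Nat) : ∀ check, (setOnes ms check).length = check.length := by
  induction ms with
  | nil => intro check; rfl
  | cons m ms ih =>
    intro check
    rw [show setOnes (m :: ms) check = setOnes ms (check.set m 1) from rfl, ih, List.length_set]

theorem setOnes_getD (ms : List Nat) : ∀ (check : List Int) (k : Nat), k < check.length →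
    (setOnes ms check).getD k 0 = if k ∈ ms then 1 else check.getD k 0 := by
  induction ms with
  | nil => intro check k _; simp [setOnes]
  | cons m ms ih =>
    intro check k hk
    rw [show setOnes (m :: ms) check = setOnes ms (check.set m 1) from rfl,
      ih _ k (by simpa using hk)]
    by_cases hkm : k ∈ ms
    · rw [if_pos hkm, if_pos (List.mem_cons_of_mem m hkm)]
    · by_cases hke : k = m
      · subst hke
        rw [if_neg hkm, getD_set_self check k 1 hk, if_pos (List.mem_cons_self)]
      · rw [if_neg hkm, getD_set_ne check m k 1 (fun hh => hke hh.symm),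
          if_neg (by simp [hke, hkm])]

theorem setOnes_append (a b : List Nat) (check : List Int) :
    setOnes (a ++ b) check = setOnes b (setOnes a check) := by
  simp [setOnes, List.foldl_append]

theorem setOnes_flatMap {α : Type} (xs : List α) (g : α → List Nat) :
    ∀ check, setOnes (xs.flatMap g) check = xs.foldl (fun ch x => setOnes (g x) ch) check := by
  induction xs with
  | nil => intro check; rfl
  | cons x xs ih =>
    intro check
    rw [List.flatMap_cons, setOnes_append, List.foldl_cons, ih]

-- backtracking computes setOnes of MarkList
theorem btInner_eq (rest : List (List Nat))
    (IH : ∀ btc check, backtrackA rest btc check = setOnes (MarkList rest btc) check) :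
    ∀ (c : List Nat) (btc : List Int) (check : List Int),
    btInner c rest btc check =
      (c.filter (fun i => btc.getD i 0 == 0)).foldl
        (fun ch i => setOnes (MarkList rest (btc.set i 1)) ch) check := by
  intro c
  induction c with
  | nil => intro btc check; simp [btInner]
  | cons i is ih =>
    intro btc check
    rw [btInner, List.filter_cons]
    by_cases h : (btc.getD i 0 == 0) = true
    · rw [if_pos h, if_pos h, List.foldl_cons, IH, ih]
    · rw [if_neg h, if_neg h, ih]

theorem backtrackA_eq : ∀ (bc : List (List Nat)) (btc check : List Int),
    backtrackA bc btc check = setOnes (MarkList bc btc) check := by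
  intro bc
  induction bc with
  | nil => intro btc check; simp [backtrackA, MarkList, setOnes]
  | cons c rest ih =>
    intro btc check
    rw [backtrackA, btInner_eq rest ih, MarkList, setOnes_flatMap]

-- MarkList over ExtL
theorem markList_eq_ext : ∀ (bc : List (List Nat)) (btc : List Int) (u : List Nat),
    IsBin btc → (∀ c ∈ bc, ∀ i ∈ c, i < btc.length) →
    (∀ j, j < btc.length → (btc.getD j 0 = 1 ↔ j ∈ u)) →
    MarkList bc btc = (ExtL bc u).map (fun t => (binTodec (paint btc t)).toNat) := by
  intro bc
  induction bc with
  | nil => intro btc u _ _ _; simp [MarkList, ExtL, paint]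
  | cons c rest ih =>
    intro btc u hbin hcand hinv
    rw [MarkList, ExtL, List.map_flatMap]
    have hfilter : c.filter (fun i => btc.getD i 0 == 0)
        = c.filter (fun i => ¬ u.contains i) := by
      apply List.filter_congr
      intro i hi
      have hlt : i < btc.length := hcand c (by simp) i hi
      have hmem : btc.getD i 0 ∈ btc := by
        rw [List.getD_eq_getElem btc 0 hlt]; exact List.getElem_mem hlt
      rcases hbin _ hmem with h0 | h1
      · have hnu : i ∉ u := fun hu => by
          have := (hinv i hlt).mpr hu; omega
        simp only [h0]
        simp [hnu]
      · have hu : i ∈ u := (hinv i hlt).mp h1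
        simp only [h1]
        simp [hu]
    rw [hfilter]
    apply List.flatMap_congr
    intro i hif
    have hi : i ∈ c := List.mem_of_mem_filter hif
    have hiu : i ∉ u := by
      have := List.of_mem_filter hif
      simpa using this
    have hlt : i < btc.length := hcand c (by simp) i hi
    rw [ih (btc.set i 1) (u ++ [i])
      (fun x hx => by
        rcases List.mem_or_eq_of_mem_set hx with hm | he
        · exact hbin x hm
        · right; exact he)
      (fun c' hc' i' hi' => by
        rw [List.length_set]; exact hcand c' (List.mem_cons_of_mem c hc') i' hi')
      (fun j hj => by
        rw [List.length_set] at hj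
        by_cases hji : j = i
        · subst hji
          rw [getD_set_self btc j 1 hj]
          simp
        · rw [getD_set_ne btc i j 1 (fun hh => hji hh.symm), hinv j hj]
          simp [hji])]
    rw [List.map_map]
    rfl

-- ExtL element facts
theorem extL_mem : ∀ (bc : List (List Nat)) (u t : List Nat), t ∈ ExtL bc u →
    t.Nodup ∧ ∀ i ∈ t, i ∉ u ∧ ∃ c ∈ bc, i ∈ c := by
  intro bc
  induction bc with
  | nil =>
    intro u t ht
    simp [ExtL] at ht
    subst ht
    simp
  | cons c rest ih =>
    intro u t ht
    simp only [ExtL, List.mem_flatMap, List.mem_map] at ht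
    obtain ⟨i, hif, t', ht', rfl⟩ := ht
    have hi : i ∈ c := List.mem_of_mem_filter hif
    have hiu : i ∉ u := by
      have := List.of_mem_filter hif; simpa using this
    obtain ⟨hnd, hall⟩ := ih (u ++ [i]) t' ht'
    constructor
    · refine List.nodup_cons.mpr ⟨fun hmem => ?_, hnd⟩
      have := (hall i hmem).1
      simp at this
    · intro x hx
      rcases List.mem_cons.mp hx with rfl | hx'
      · exact ⟨hiu, c, by simp, hi⟩
      · obtain ⟨hxu, c', hc', hxc'⟩ := hall x hx'
        exact ⟨fun hu => hxu (by simp [hu]), c', List.mem_cons_of_mem c hc', hxc'⟩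

-- the product-with-pruning fold is ExtL
theorem fold_ext : ∀ (bc : List (List Nat)) (acc : List (List Nat)),
    bc.foldl (fun acc c =>
      acc.flatMap (fun t => (c.filter (fun i => ¬ t.contains i)).map (fun i => t ++ [i]))) acc
    = acc.flatMap (fun t => (ExtL bc t).map (fun s => t ++ s)) := by
  intro bc
  induction bc with
  | nil =>
    intro acc
    simp [ExtL]
  | cons c rest ih =>
    intro acc
    rw [List.foldl_cons, ih]
    rw [List.flatMap_assoc]
    apply List.flatMap_congr
    intro t _
    rw [List.flatMap_map]
    simp only [ExtL, List.map_flatMap, List.map_map]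
    apply List.flatMap_congr
    intro i _
    apply List.map_congr_left
    intro s _
    simp only [Function.comp_def]
    exact (List.append_cons t i s).symm

-- A's banned_case equals candsOf
theorem compareWord_eq (a b : Char) : compareWord a b = (b == '*' || b == a) := by
  unfold compareWord
  by_cases h1 : b = '*'
  · simp [h1]
  · by_cases h2 : b = a
    · simp [h1, h2]
    · simp [h1, h2]

theorem flagLoop_eq : ∀ (as bs : List Char), as.length = bs.length →
    ((flagLoop as bs == 1) : Bool) = (as.zip bs).all (fun p => p.2 == '*' || p.2 == p.1) := by
  intro as
  induction as with
  | nil =>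
    intro bs hl
    cases bs with
    | nil => rfl
    | cons b bs => simp at hl
  | cons a as ih =>
    intro bs hl
    cases bs with
    | nil => simp at hl
    | cons b bs =>
      simp only [flagLoop, compareWord_eq, List.zip_cons_cons, List.all_cons]
      by_cases h : (b == '*' || b == a) = true
      · rw [if_pos h, h, Bool.true_and, ih bs (by simpa using hl)]
      · rw [if_neg h]
        simp at h
        simp [h]

theorem matchB_eq_parts (u b : List Char) :
    matchB u b = true ↔
      u.length = b.length ∧ (u.zip b).all (fun p => p.2 == '*' || p.2 == p.1) = true := by
  simp [matchB]

theorem buildCases_def (u bnd : List String) :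
    buildCases u bnd
      = (List.range u.length).foldl (fun bc i => innerAll u bnd i bc)
          (List.replicate bnd.length []) := rfl

theorem stepA_eq (u bnd : List String) (i : Nat) (bc : List (List Nat)) (j : Nat) :
    stepA u bnd i bc j
      = if matchB (u.getD i "").toList (bnd.getD j "").toList = true
        then bc.modify j (fun l => l ++ [i]) else bc := by
  unfold stepA
  by_cases hlen : (u.getD i "").toList.length = (bnd.getD j "").toList.length
  · rw [if_neg (by omega)]
    by_cases hflag : flagLoop (u.getD i "").toList (bnd.getD j "").toList = 1
    · rw [if_pos hflag, if_pos ((matchB_eq_parts _ _).mpr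
        ⟨hlen, by rw [← flagLoop_eq _ _ hlen]; exact beq_iff_eq.mpr hflag⟩)]
    · rw [if_neg hflag, if_neg (fun hm => by
        obtain ⟨-, hall⟩ := (matchB_eq_parts _ _).mp hm
        rw [← flagLoop_eq _ _ hlen] at hall
        exact hflag (beq_iff_eq.mp hall))]
  · rw [if_pos (by omega), if_neg (fun hm => hlen ((matchB_eq_parts _ _).mp hm).1)]

-- inner loop characterization (A, fixed user index i)
theorem innerA_char (u bnd : List String) (i : Nat) :
    ∀ (m : Nat), m ≤ bnd.length → ∀ (bc : List (List Nat)), bc.length = bnd.length →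
    (((List.range m).foldl (stepA u bnd i) bc).length = bc.length)
    ∧ ∀ j, ((List.range m).foldl (stepA u bnd i) bc).getD j []
      = if j < m ∧ matchB (u.getD i "").toList (bnd.getD j "").toList = true
        then bc.getD j [] ++ [i] else bc.getD j [] := by
  intro m
  induction m with
  | zero =>
    intro _ bc _
    exact ⟨rfl, fun j => by simp⟩
  | succ m ihm =>
    intro hm bc hbc
    obtain ⟨ihlen, ihget⟩ := ihm (by omega) bc hbc
    rw [List.range_succ, List.foldl_append, List.foldl_cons, List.foldl_nil, stepA_eq]
    by_cases hc : matchB (u.getD i "").toList (bnd.getD m "").toList = true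
    · rw [if_pos hc]
      have hmlt : m < ((List.range m).foldl (stepA u bnd i) bc).length := by
        rw [ihlen, hbc]; omega
      refine ⟨by rw [List.length_modify, ihlen], fun j => ?_⟩
      by_cases hjm : j = m
      · subst hjm
        rw [getD_modify_self _ _ _ hmlt, ihget j, if_neg (by rintro ⟨h1, -⟩; omega),
          if_pos ⟨by omega, hc⟩]
      · rw [getD_modify_ne _ _ _ _ (fun hh => hjm hh.symm), ihget j]
        by_cases hjlt : j < m ∧ matchB (u.getD i "").toList (bnd.getD j "").toList = true
        · rw [if_pos hjlt, if_pos ⟨by omega, hjlt.2⟩]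
        · have hne : ¬(j < m + 1 ∧ matchB (u.getD i "").toList (bnd.getD j "").toList = true) := by
            rintro ⟨h1, h2⟩
            exact hjlt ⟨by omega, h2⟩
          rw [if_neg hjlt, if_neg hne]
    · rw [if_neg hc]
      refine ⟨ihlen, fun j => ?_⟩
      rw [ihget j]
      by_cases hjlt : j < m ∧ matchB (u.getD i "").toList (bnd.getD j "").toList = true
      · rw [if_pos hjlt, if_pos ⟨by omega, hjlt.2⟩]
      · have hne : ¬(j < m + 1 ∧ matchB (u.getD i "").toList (bnd.getD j "").toList = true) := by
          rintro ⟨h1, h2⟩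
          apply hjlt
          refine ⟨?_, h2⟩
          rcases Nat.lt_succ_iff_lt_or_eq.mp h1 with h | h
          · exact h
          · subst h; exact absurd h2 hc
        rw [if_neg hjlt, if_neg hne]

theorem innerAll_char (u bnd : List String) (i : Nat) (bc : List (List Nat))
    (hbc : bc.length = bnd.length) :
    ((innerAll u bnd i bc).length = bc.length)
    ∧ ∀ j, (innerAll u bnd i bc).getD j []
      = if j < bnd.length ∧ matchB (u.getD i "").toList (bnd.getD j "").toList = true
        then bc.getD j [] ++ [i] else bc.getD j [] :=
  innerA_char u bnd i bnd.length le_rfl bc hbc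

-- outer loop characterization
theorem buildCases_char (u bnd : List String) : ∀ (m : Nat),
    (((List.range m).foldl (fun bc i => innerAll u bnd i bc)
        (List.replicate bnd.length [])).length = bnd.length)
    ∧ ∀ j, j < bnd.length →
      ((List.range m).foldl (fun bc i => innerAll u bnd i bc)
        (List.replicate bnd.length [])).getD j []
      = (List.range m).filter
          (fun i => matchB (u.getD i "").toList (bnd.getD j "").toList) := by
  intro m
  induction m with
  | zero =>
    exact ⟨by simp, fun j hj => by simp⟩
  | succ m ihm =>
    obtain ⟨ihlen, ihget⟩ := ihm
    rw [List.range_succ]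
    simp only [List.foldl_append, List.foldl_cons, List.foldl_nil]
    obtain ⟨slen, sget⟩ := innerAll_char u bnd m _ ihlen
    constructor
    · rw [slen, ihlen]
    · intro j hj
      rw [sget j, ihget j hj, List.filter_append]
      by_cases hcm : matchB (u.getD m "").toList (bnd.getD j "").toList = true
      · rw [if_pos ⟨hj, hcm⟩, List.filter_cons, if_pos hcm, List.filter_nil]
      · rw [if_neg (by rintro ⟨-, hh⟩; exact hcm hh), List.filter_cons, if_neg hcm,
          List.filter_nil, List.append_nil]

theorem buildCases_eq (user_id banned_id : List String) :
    buildCases user_id banned_id = candsOf user_id banned_id := by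
  obtain ⟨hlen, hget⟩ := buildCases_char user_id banned_id user_id.length
  rw [buildCases_def]
  have hlen' : ((List.range user_id.length).foldl (fun bc i => innerAll user_id banned_id i bc)
      (List.replicate banned_id.length [])).length = (candsOf user_id banned_id).length := by
    rw [candsOf, List.length_map, hlen]
  apply List.ext_getElem hlen'
  intro j h1 h2
  have hj : j < banned_id.length := by
    simpa [candsOf] using h2
  have e1 : ((List.range user_id.length).foldl (fun bc i => innerAll user_id banned_id i bc)
      (List.replicate banned_id.length []))[j]
      = ((List.range user_id.length).foldl (fun bc i => innerAll user_id banned_id i bc)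
      (List.replicate banned_id.length [])).getD j [] := by
    rw [List.getD_eq_getElem _ _ h1]
  have e2 : (candsOf user_id banned_id)[j] = (List.range user_id.length).filter
      (fun i => matchB (user_id.getD i "").toList (banned_id.getD j "").toList) := by
    simp only [candsOf, List.getElem_map]
    congr 1
    funext i
    congr 2
    rw [List.getD_eq_getElem _ _ hj]
  rw [e1, e2]
  exact hget j hj

-- B's candidate lists equal candsOf
theorem enum_filter_map (f : String → Bool) :
    ∀ (u : List String) (s : Nat),
    ((PySem.List.enumerate u (s : Int)).filter (fun p => f p.2)).map (fun p => p.1.toNat)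
    = ((List.range u.length).filter (fun k => f (u.getD k ""))).map (fun k => s + k) := by
  intro u
  induction u with
  | nil => intro s; simp [PySem.List.enumerate]
  | cons x xs ih =>
    intro s
    rw [PySem.List.enumerate_cons]
    have hcast : (s : Int) + 1 = ((s + 1 : Nat) : Int) := by push_cast; ring
    rw [List.length_cons, List.range_succ_eq_map]
    by_cases hx : f x = true
    · rw [List.filter_cons_of_pos (by simpa using hx), List.map_cons,
        List.filter_cons_of_pos (by simpa using hx), List.map_cons,
        hcast, ih (s+1), List.filter_map, List.map_map]
      simp only [Int.toNat_natCast, Nat.add_zero, Function.comp_def, Nat.succ_eq_add_one,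
        List.getD_cons_succ]
      congr 1
      apply List.map_congr_left
      intro k _
      omega
    · rw [List.filter_cons_of_neg (by simpa using hx),
        List.filter_cons_of_neg (by simpa using hx),
        hcast, ih (s+1), List.filter_map, List.map_map]
      simp only [Function.comp_def, Nat.succ_eq_add_one, List.getD_cons_succ]
      apply List.map_congr_left
      intro k _
      omega

theorem cands_alt_eq (user_id banned_id : List String) :
    banned_id.map (fun b =>
      ((PySem.List.enumerate user_id).filter
          (fun p => matchB p.2.toList b.toList)).map (fun p => p.1.toNat))
    = candsOf user_id banned_id := by
  rw [candsOf]
  apply List.map_congr_left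
  intro b _
  have h := enum_filter_map (fun s => matchB s.toList b.toList) user_id 0
  simp only [Nat.cast_zero] at h
  exact h.trans (by simp)

-- counting: sum of the check array
theorem sum_ite_mem (S : List Nat) (xs : List Nat) :
    (xs.map (fun k => if k ∈ S then (1 : Int) else 0)).sum
      = (xs.countP (fun k => k ∈ S) : Int) := by
  simpa using PySem.List.sum_map_ite_one_zero (fun k => decide (k ∈ S)) xs

theorem countP_range_eq_card (N : Nat) (S : List Nat) (h : ∀ m ∈ S, m < N) :
    (List.range N).countP (fun k => k ∈ S) = S.toFinset.card := by
  rw [List.countP_eq_length_filter]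
  have hnd : ((List.range N).filter (fun k => k ∈ S)).Nodup :=
    (List.nodup_range).filter _
  rw [← List.toFinset_card_of_nodup hnd]
  congr 1
  apply Finset.ext
  intro a
  simp only [List.mem_toFinset, List.mem_filter, List.mem_range, decide_eq_true_eq]
  exact ⟨fun ⟨_, h2⟩ => h2, fun ha => ⟨h a ha, ha⟩⟩

theorem set_ofList_length (l : List (List Nat)) :
    (PySem.Set.ofList l).length = l.toFinset.card := by
  rw [← List.toFinset_card_of_nodup (PySem.Set.nodup_ofList l)]
  congr 1
  apply Finset.ext
  intro a
  simp [PySem.Set.mem_ofList]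

theorem toFinset_map_eq {α β : Type} [DecidableEq α] [DecidableEq β]
    (l : List α) (f : α → β) : (l.map f).toFinset = l.toFinset.image f := by
  ext b
  simp

-- masks determine index sets (on index lists below n)
theorem mask_mem_iff (n : Nat) (t1 t2 : List Nat)
    (h1 : ∀ i ∈ t1, i < n) (h2 : ∀ i ∈ t2, i < n)
    (h : maskF (List.replicate n 0) t1 = maskF (List.replicate n 0) t2) :
    ∀ j, j ∈ t1 ↔ j ∈ t2 := by
  have hbin0 : IsBin (List.replicate n (0:Int)) := by
    intro x hx; left; exact List.eq_of_mem_replicate hx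
  have hb1 := paint_isBin t1 _ hbin0
  have hb2 := paint_isBin t2 _ hbin0
  have hl1 : (paint (List.replicate n (0:Int)) t1).length = n := by
    rw [paint_length]; simp
  have hl2 : (paint (List.replicate n (0:Int)) t2).length = n := by
    rw [paint_length]; simp
  have hbd1 := binLE_bounds _ hb1
  have hbd2 := binLE_bounds _ hb2
  unfold maskF at h
  rw [binTodec_eq_binLE, binTodec_eq_binLE] at h
  have hle : binLE (paint (List.replicate n 0) t1) = binLE (paint (List.replicate n 0) t2) := by
    omega
  have hpaint := binLE_inj _ _ hb1 hb2 (by rw [hl1, hl2]) hle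
  intro j
  by_cases hj : j < n
  · have g1 := paint_getD t1 (List.replicate n 0) j
      (fun i hi => by simpa using h1 i hi) (by simpa using hj)
    have g2 := paint_getD t2 (List.replicate n 0) j
      (fun i hi => by simpa using h2 i hi) (by simpa using hj)
    rw [hpaint, g2] at g1
    by_cases m1 : j ∈ t1 <;> by_cases m2 : j ∈ t2
    · simp [m1, m2]
    · rw [if_pos m1, if_neg m2] at g1
      have hz : (List.replicate n (0:Int)).getD j 0 = 0 := by simp
      rw [hz] at g1
      omega
    · rw [if_neg m1, if_pos m2] at g1
      have hz : (List.replicate n (0:Int)).getD j 0 = 0 := by simp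
      rw [hz] at g1
      omega
    · simp [m1, m2]
  · constructor
    · intro hm; exact absurd (h1 j hm) hj
    · intro hm; exact absurd (h2 j hm) hj

theorem sort_eq_of_mem_iff (t1 t2 : List Nat) (h1 : t1.Nodup) (h2 : t2.Nodup)
    (h : ∀ j, j ∈ t1 ↔ j ∈ t2) :
    t1.mergeSort (· ≤ ·) = t2.mergeSort (· ≤ ·) := by
  have hperm : t1.Perm t2 := (List.perm_ext_iff_of_nodup h1 h2).mpr h
  have hp : (t1.mergeSort (· ≤ ·)).Perm (t2.mergeSort (· ≤ ·)) :=
    ((List.mergeSort_perm t1 _).trans hperm).trans (List.mergeSort_perm t2 _).symm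
  have hs1 : (t1.mergeSort (· ≤ ·)).Pairwise (· ≤ ·) := by
    have := List.sorted_mergeSort (le := fun a b : Nat => decide (a ≤ b))
      (by intro a b c; simp; omega) (by intro a b; simp; omega) t1
    simpa using this
  have hs2 : (t2.mergeSort (· ≤ ·)).Pairwise (· ≤ ·) := by
    have := List.sorted_mergeSort (le := fun a b : Nat => decide (a ≤ b))
      (by intro a b c; simp; omega) (by intro a b; simp; omega) t2
    simpa using this
  exact PySem.List.eq_of_perm_of_pairwise_le hp hs1 hs2

theorem maskF_sort (btc0 : List Int) (t : List Nat) :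
    maskF btc0 (t.mergeSort (· ≤ ·)) = maskF btc0 t := by
  unfold maskF
  rw [paint_perm btc0 _ _ (List.mergeSort_perm t _)]

-- the two deduplicated counts agree
theorem card_sort_eq_card_mask (n : Nat) (combos : List (List Nat))
    (hel : ∀ t ∈ combos, t.Nodup ∧ ∀ i ∈ t, i < n) :
    ((combos.map (fun t => t.mergeSort (· ≤ ·))).toFinset).card
    = ((combos.map (fun t => maskF (List.replicate n 0) t)).toFinset).card := by
  rw [toFinset_map_eq, toFinset_map_eq]
  have himg : (combos.toFinset.image (fun t => t.mergeSort (· ≤ ·))).image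
        (maskF (List.replicate n 0))
      = combos.toFinset.image (fun t => maskF (List.replicate n 0) t) := by
    rw [Finset.image_image]
    apply Finset.image_congr
    intro t _
    exact maskF_sort _ t
  rw [← himg]
  symm
  apply Finset.card_image_of_injOn
  intro a ha b hb hab
  simp only [Finset.coe_image, Set.mem_image, Finset.mem_coe, List.mem_toFinset] at ha hb
  obtain ⟨t1, ht1, rfl⟩ := ha
  obtain ⟨t2, ht2, rfl⟩ := hb
  rw [maskF_sort, maskF_sort] at hab
  exact sort_eq_of_mem_iff t1 t2 (hel t1 ht1).1 (hel t2 ht2).1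
    (mask_mem_iff n t1 t2 (hel t1 ht1).2 (hel t2 ht2).2 hab)

-- final assembly
theorem solution_eq (user_id banned_id : List String) :
    solution user_id banned_id = solution_alt user_id banned_id := by
  have hcand_lt : ∀ c ∈ candsOf user_id banned_id, ∀ i ∈ c, i < user_id.length := by
    intro c hc i hi
    simp only [candsOf, List.mem_map] at hc
    obtain ⟨b, -, rfl⟩ := hc
    have := List.mem_of_mem_filter hi
    simpa using this
  have hbin0 : IsBin (List.replicate user_id.length (0:Int)) := by
    intro x hx; left; exact List.eq_of_mem_replicate hx
  have hmark : MarkList (candsOf user_id banned_id) (List.replicate user_id.length 0)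
      = (ExtL (candsOf user_id banned_id) []).map
          (fun t => maskF (List.replicate user_id.length 0) t) := by
    apply markList_eq_ext
    · exact hbin0
    · intro c hc i hi
      rw [List.length_replicate]
      exact hcand_lt c hc i hi
    · intro j hj
      simp
  have hel : ∀ t ∈ ExtL (candsOf user_id banned_id) [],
      t.Nodup ∧ ∀ i ∈ t, i < user_id.length := by
    intro t ht
    obtain ⟨hnd, hall⟩ := extL_mem (candsOf user_id banned_id) [] t ht
    refine ⟨hnd, fun i hi => ?_⟩
    obtain ⟨-, c, hc, hic⟩ := hall i hi
    exact hcand_lt c hc i hic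
  have hS_lt : ∀ m ∈ MarkList (candsOf user_id banned_id) (List.replicate user_id.length 0),
      m < 2 ^ user_id.length := by
    rw [hmark]
    intro m hm
    simp only [List.mem_map] at hm
    obtain ⟨t, ht, rfl⟩ := hm
    have hb := paint_isBin t _ hbin0
    have hbd := binLE_bounds _ hb
    have hl : (paint (List.replicate user_id.length (0:Int)) t).length = user_id.length := by
      rw [paint_length]; simp
    rw [hl] at hbd
    unfold maskF
    rw [binTodec_eq_binLE]
    have h2 : ((2:Int) ^ user_id.length) = ((2 ^ user_id.length : Nat) : Int) := by
      push_cast; ring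
    omega
  have hcheck : setOnes (MarkList (candsOf user_id banned_id) (List.replicate user_id.length 0))
        (List.replicate (2 ^ user_id.length) (0:Int))
      = (List.range (2 ^ user_id.length)).map
          (fun k => if k ∈ MarkList (candsOf user_id banned_id) (List.replicate user_id.length 0)
                    then (1:Int) else 0) := by
    apply List.ext_getElem
    · rw [setOnes_length]; simp
    · intro k h1 h2
      have hk : k < 2 ^ user_id.length := by
        rw [setOnes_length] at h1; simpa using h1
      have e1 := setOnes_getD
        (MarkList (candsOf user_id banned_id) (List.replicate user_id.length 0))
        (List.replicate (2 ^ user_id.length) (0:Int)) k (by simpa using hk)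
      rw [List.getD_eq_getElem _ _ h1] at e1
      have e2 := PySem.List.getD_map_range
        (fun k => if k ∈ MarkList (candsOf user_id banned_id) (List.replicate user_id.length 0)
                  then (1:Int) else 0) (2 ^ user_id.length) k 0 hk
      rw [List.getD_eq_getElem _ _ h2] at e2
      rw [e1, e2]
      simp
  have hsum : ∀ (L : List Int), L.foldl (· + ·) 0 = L.sum := fun L => by
    simpa using PySem.List.foldl_add L (fun x => x) 0
  have hA : solution user_id banned_id
      = ((MarkList (candsOf user_id banned_id)
          (List.replicate user_id.length 0)).toFinset.card : Int) := by
    simp only [solution]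
    rw [buildCases_eq, backtrackA_eq, hcheck, hsum, sum_ite_mem,
      countP_range_eq_card _ _ hS_lt]
  have hB : solution_alt user_id banned_id
      = (((ExtL (candsOf user_id banned_id) []).map
            (fun t => t.mergeSort (· ≤ ·))).toFinset.card : Int) := by
    simp only [solution_alt]
    rw [cands_alt_eq, fold_ext,
      show ([([] : List Nat)].flatMap
          (fun t => (ExtL (candsOf user_id banned_id) t).map (fun s => t ++ s)))
        = ExtL (candsOf user_id banned_id) [] by simp,
      set_ofList_length]
  rw [hA, hB, hmark, card_sort_eq_card_mask user_id.length _ hel]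

-- ===== VERDICT (by name: the statement is the Claim_ definition above) =====
theorem solution_spec : Claim_equal_solution := by
  intro user_id banned_id _
  unfold Spec_solution
  exact solution_eq user_id banned_id
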